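-- pv_equiv track=rewrite | github.com/jsmatfess/ltrbxd | ltrbxd.py | prepare_valid_words
-- ===== SOURCE A (Python) =====
-- def is_valid_word(word: str, sides: list[str]) -> bool:
--     """Check if word can be made from given letter sides according to puzzle rules.
--
--     A valid word must:
--     - Be at least 3 letters long
--     - Only use letters from the provided sides
--     - Not have consecutive letters from the same side
--
--     Args:
--         word (str): Word to check for validity
--         sides (list[str]): List of strings, each containing letters from one side of the puzzle
--
--     Returns:
--         bool: True if word follows all puzzle rules, False otherwise
--     """
--     if len(word) < 3:  # Words must be 3+ letters
--         return False
--
--     # Check all letters are from the sides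
--     valid_letters = list("".join(sides))
--     if not all(c in valid_letters for c in word):
--         return False
--
--     # Check consecutive letters aren't from same side
--     for i in range(len(word) - 1):
--         for side in sides:
--             if word[i] in side and word[i + 1] in side:
--                 return False
--
--     return True
--
-- def group_words_by_start(
--     sides: list[str], valid_words: list[str]
-- ) -> dict[str, list[str]]:
--     """Group valid words by their starting letter for efficient lookup.
--
--     Args:
--         valid_words (list[str]): List of words that are valid for the puzzle
--
--     Returns:
--         dict[str, list[str]]: Dictionary mapping starting letters to lists of words
--             that begin with that letter
--     """
--     return {
--         letter: [word for word in valid_words if word[0] == letter]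
--         for letter in "".join(sides)
--     }
--
-- def prepare_valid_words(
--     word_list: list[str], sides: list[str], skip_validation: bool
-- ) -> tuple[list[str], dict[str, list[str]]]:
--     """Prepare and organize valid words for efficient puzzle solving.
--
--     Filters word list to only valid words according to puzzle rules,
--     sorts them by length and alphabetically, and groups them by starting letter.
--
--     Args:
--         word_list (list[str]): List of all possible dictionary words
--         sides (list[str]): List of strings representing letters on each side of puzzle
--
--     Returns:
--         tuple[list[str], dict[str, list[str]]]: Tuple containing:
--             - List of valid words sorted by length, then alphabetically
--             - Dictionary mapping starting letters to lists of valid words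
--     """
--     valid_words = (
--         [word for word in word_list if is_valid_word(word, sides)]
--         if not skip_validation
--         else word_list
--     )
--     valid_words.sort(key=lambda x: (len(x), x))
--     words_by_start = group_words_by_start(sides, valid_words)
--     return valid_words, words_by_start
-- ===== SOURCE B (Python) =====
-- def prepare_valid_words(word_list, sides, skip_validation):
--     # char -> list of side indices (a letter may sit on several sides)
--     side_idx = {}
--     for i, side in enumerate(sides):
--         for c in side:
--             side_idx.setdefault(c, []).append(i)
--
--     def valid(word):
--         if len(word) < 3:
--             return False
--         seq = []
--         for c in word:
--             if c not in side_idx: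
--                 return False
--             seq.append(side_idx[c])
--         for a, b in zip(seq, seq[1:]):
--             if any(i in b for i in a):
--                 return False
--         return True
--
--     if skip_validation:
--         word_list.sort(key=lambda x: (len(x), x))
--         valid_words = word_list
--     else:
--         valid_words = sorted((w for w in word_list if valid(w)),
--                              key=lambda x: (len(x), x))
--
--     groups = {}
--     for side in sides:
--         for c in side:
--             groups.setdefault(c, [])
--     for w in valid_words:
--         if w[0] in groups:
--             groups[w[0]].append(w)
--     return valid_words, groups
-- ===== Notes on version B (the rewrite author's own statement) =====
-- stated objective: alternative
-- what changed: B precomputes a char-to-side-indices dict once and validates each word by a single adjacency scan over the word's index lists (instead of A's per-pair scan over all sides inside every word), and builds the letter groups in one pass over the sorted valid words by appending to pre-initialised buckets (instead of A's one filter pass of the whole word list per letter).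
-- outside the precondition, e.g. on prepare_valid_words([''], ['', ''], True): A returns ([''], {}), B raises IndexError
import Mathlib
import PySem

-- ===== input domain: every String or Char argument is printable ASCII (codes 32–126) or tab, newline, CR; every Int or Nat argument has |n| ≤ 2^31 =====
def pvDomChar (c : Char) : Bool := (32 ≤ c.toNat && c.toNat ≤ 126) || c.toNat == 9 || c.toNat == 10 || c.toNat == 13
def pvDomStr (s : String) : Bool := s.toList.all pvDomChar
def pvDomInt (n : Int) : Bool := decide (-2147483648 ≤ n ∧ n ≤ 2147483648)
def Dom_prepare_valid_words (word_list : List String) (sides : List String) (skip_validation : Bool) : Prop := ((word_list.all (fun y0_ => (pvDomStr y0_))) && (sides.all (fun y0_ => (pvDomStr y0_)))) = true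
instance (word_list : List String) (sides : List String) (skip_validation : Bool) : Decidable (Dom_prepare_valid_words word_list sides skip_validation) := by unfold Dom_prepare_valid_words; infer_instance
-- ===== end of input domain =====

-- B replaces A's per-pair scan over all sides by a char→side-indices dict built once (word validity
-- becomes one scan over adjacent index lists) and builds the grouping in a single pass over the sorted
-- words instead of one filter pass per letter; equivalence is about the RETURN value only (Python A and
-- B both sort word_list in place when skip_validation is true).


-- ===== PORT A =====

-- 'word[i] in side and word[i+1] in side' for one side
def pvBadPairA (sides : List String) (c1 c2 : Char) : Bool :=
  sides.any (fun side => side.toList.contains c1 && side.toList.contains c2)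

-- 'for i in range(len(word)-1): for side in sides: if …: return False' as structural recursion
def pvAdjScanA (sides : List String) : List Char → Bool
  | c1 :: c2 :: rest => pvBadPairA sides c1 c2 || pvAdjScanA sides (c2 :: rest)
  | _ => false

def is_valid_word (word : String) (sides : List String) : Bool :=
  if PySem.Str.len word < 3 then false
  else
    let valid_letters := (PySem.Str.join "" sides).toList
    if !(word.toList.all (fun c => valid_letters.contains c)) then false
    else if pvAdjScanA sides word.toList then false
    else true

-- dict comprehension over '"".join(sides)'; 'word[0] == letter' is ported via pyGet? (none, i.e. a
-- Python IndexError on an empty word, compares unequal to every letter — empty words are outside Pre_)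
def group_words_by_start (sides : List String) (valid_words : List String) : PySem.Dict String (List String) :=
  (PySem.Str.join "" sides).toList.foldl
    (fun d c => d.insert (String.ofList [c])
      (valid_words.filter (fun w => PySem.Str.pyGet? w 0 == some c)))
    PySem.Dict.empty

def prepare_valid_words (word_list : List String) (sides : List String) (skip_validation : Bool) : List String × (List (String × List String)) :=
  let valid_words := if !skip_validation then word_list.filter (fun w => is_valid_word w sides) else word_list
  let valid_words := PySem.List.sorted2 valid_words PySem.Str.len (fun x => x)
  let words_by_start := group_words_by_start sides valid_words
  (valid_words, words_by_start.items)

-- ===== PORT B =====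

-- char → list of side indices, built once ('side_idx.setdefault(c, []).append(i)')
def pvSideIdx (sides : List String) : PySem.Dict Char (List Int) :=
  (PySem.List.enumerate sides).foldl
    (fun d p => p.2.toList.foldl (fun d c => d.modify c [] (· ++ [p.1])) d)
    PySem.Dict.empty

-- 'seq = []; for c in word: if c not in side_idx: return False; seq.append(side_idx[c])'
def pvSeqB (idx : PySem.Dict Char (List Int)) : List Char → Option (List (List Int))
  | [] => some []
  | c :: rest =>
    if idx.contains c then
      match pvSeqB idx rest with
      | some seq => some (idx.getD c [] :: seq)
      | none => none
    else none

-- 'for a, b in zip(seq, seq[1:]): if any(i in b for i in a): return False'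
def pvAdjOkB : List (List Int) → Bool
  | a :: b :: rest => !(a.any (fun i => b.contains i)) && pvAdjOkB (b :: rest)
  | _ => true

def pvValidB (idx : PySem.Dict Char (List Int)) (word : String) : Bool :=
  if PySem.Str.len word < 3 then false
  else
    match pvSeqB idx word.toList with
    | none => false
    | some seq => pvAdjOkB seq

-- 'groups.setdefault(c, [])' over the sides
def pvInitGroups (sides : List String) : PySem.Dict String (List String) :=
  sides.foldl (fun d side => side.toList.foldl (fun d c => d.setdefault (String.ofList [c]) []) d)
    PySem.Dict.empty

-- 'for w in valid_words: if w[0] in groups: groups[w[0]].append(w)' ('w[0]' via pyGet?; none, i.e. a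
-- Python IndexError on an empty word, is outside Pre_ — the port skips such a word)
def pvFillGroups (g0 : PySem.Dict String (List String)) (ws : List String) : PySem.Dict String (List String) :=
  ws.foldl (fun g w =>
    match PySem.Str.pyGet? w 0 with
    | some c => if g.contains (String.ofList [c]) then g.modify (String.ofList [c]) [] (· ++ [w]) else g
    | none => g) g0

def prepare_valid_words_alt (word_list : List String) (sides : List String) (skip_validation : Bool) : List String × (List (String × List String)) :=
  let idx := pvSideIdx sides
  let valid_words :=
    if skip_validation then PySem.List.sorted2 word_list PySem.Str.len (fun x => x)
    else PySem.List.sorted2 (word_list.filter (fun w => pvValidB idx w)) PySem.Str.len (fun x => x)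
  (valid_words, (pvFillGroups (pvInitGroups sides) valid_words).items)

-- ===== PRECONDITION & SPEC =====

-- Pre_ excludes empty-string words under skip_validation: there Python A's grouping evaluates word[0]
-- and raises IndexError (except in the degenerate all-empty-sides case, where A only accidentally
-- avoids the access because the dict comprehension is empty), and Python B raises IndexError too.
def Pre_prepare_valid_words (word_list : List String) (sides : List String) (skip_validation : Bool) : Prop :=
  skip_validation = true → "" ∉ word_list
instance (word_list : List String) (sides : List String) (skip_validation : Bool) : Decidable (Pre_prepare_valid_words word_list sides skip_validation) := by unfold Pre_prepare_valid_words; infer_instance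

def pvWitness_prepare_valid_words : List String × List String × Bool := (["cab", "ac", "xyz", "cbc"], ["ab", "c"], false)

def Spec_prepare_valid_words (word_list : List String) (sides : List String) (skip_validation : Bool) (out : List String × (List (String × List String))) : Prop := out = prepare_valid_words_alt word_list sides skip_validation
instance (word_list : List String) (sides : List String) (skip_validation : Bool) (out : List String × (List (String × List String))) : Decidable (Spec_prepare_valid_words word_list sides skip_validation out) := by unfold Spec_prepare_valid_words; infer_instance

-- ===== CLAIM (what is proved, stated in full; the proofs are below) =====
def Claim_equal_prepare_valid_words : Prop := ∀ (word_list : List String) (sides : List String) (skip_validation : Bool), Dom_prepare_valid_words word_list sides skip_validation → Pre_prepare_valid_words word_list sides skip_validation → Spec_prepare_valid_words word_list sides skip_validation (prepare_valid_words word_list sides skip_validation)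

-- ===== LEMMAS AND PROOFS =====

-- the joined letters, as one flat list of chars
def pvChars (sides : List String) : List Char := (sides.map String.toList).flatten

lemma pv_join_flatten (css : List (List Char)) : PySem.Chars.join [] css = css.flatten := by
  induction css with
  | nil => simp [PySem.Chars.join_nil]
  | cons p rest ih =>
    cases rest with
    | nil => simp [PySem.Chars.join_singleton]
    | cons q r => simp [PySem.Chars.join_cons_cons, ih]

lemma pv_joined_eq (sides : List String) : (PySem.Str.join "" sides).toList = pvChars sides := by
  rw [PySem.Str.toList_join]
  simpa [pvChars] using pv_join_flatten (sides.map String.toList)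

-- the (char, side-index) pairs pvSideIdx is built from
def pvPairs (sides : List String) : List (Char × Int) :=
  (PySem.List.enumerate sides).flatMap (fun p => p.2.toList.map (fun c => (c, p.1)))

lemma pvSideIdx_eq_flat (sides : List String) :
    pvSideIdx sides = (pvPairs sides).foldl (fun d q => d.modify q.1 [] (· ++ [q.2])) PySem.Dict.empty := by
  simp [pvSideIdx, pvPairs, List.flatMap, List.foldl_flatten, List.foldl_map]

lemma pv_mem_enumerate {α : Type} (xs : List α) (k : Int) (p : Int × α) :
    p ∈ PySem.List.enumerate xs k ↔ ∃ j : Nat, ∃ h : j < xs.length, p = (k + j, xs[j]) := by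
  induction xs generalizing k with
  | nil => simp [PySem.List.enumerate]
  | cons x t ih =>
    simp only [PySem.List.enumerate, List.mem_cons, ih (k+1)]
    constructor
    · rintro (rfl | ⟨j, hj, rfl⟩)
      · exact ⟨0, by simp, by simp⟩
      · refine ⟨j+1, by simpa using hj, ?_⟩
        simp only [Prod.mk.injEq]
        constructor
        · push_cast; ring
        · simp
    · rintro ⟨j, hj, rfl⟩
      cases j with
      | zero => left; simp
      | succ j =>
        right; refine ⟨j, by simpa using hj, ?_⟩
        simp only [Prod.mk.injEq]
        constructor
        · push_cast; ring
        · simp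

lemma pv_getD_sideIdx (sides : List String) (c : Char) (i : Int) :
    i ∈ (pvSideIdx sides).getD c [] ↔ ∃ p ∈ PySem.List.enumerate sides 0, c ∈ p.2.toList ∧ i = p.1 := by
  rw [pvSideIdx_eq_flat, PySem.Dict.getD_foldl_modify_append]
  simp only [PySem.Dict.getD_empty, List.nil_append, List.mem_map, List.mem_filter, pvPairs,
    List.mem_flatMap, List.mem_map]
  constructor
  · rintro ⟨⟨c', i'⟩, ⟨⟨p, hp, c'', hc'', heq⟩, hbeq⟩, rfl⟩
    obtain ⟨rfl, rfl⟩ := Prod.mk.injEq .. ▸ heq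
    simp only [beq_iff_eq] at hbeq
    exact ⟨p, hp, hbeq ▸ hc'', rfl⟩
  · rintro ⟨p, hp, hc, rfl⟩
    exact ⟨(c, p.1), ⟨⟨p, hp, c, hc, rfl⟩, by simp⟩, rfl⟩

lemma pv_contains_sideIdx (sides : List String) (c : Char) :
    (pvSideIdx sides).contains c = (pvChars sides).contains c := by
  rw [Bool.eq_iff_iff, pvSideIdx_eq_flat]
  rw [PySem.Dict.contains_iff_mem_keys,
    PySem.Dict.keys_foldl_modify_key (pvPairs sides) Prod.fst [] (fun _ q v => v ++ [q.2]) PySem.Dict.empty]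
  simp only [PySem.Dict.keys_empty, List.contains_eq_mem, decide_eq_true_eq]
  have hupd : PySem.Set.update ([] : PySem.Set Char) ((pvPairs sides).map Prod.fst)
      = PySem.Set.ofList ((pvPairs sides).map Prod.fst) := by
    rw [PySem.Set.ofList_eq_foldl]; rfl
  rw [hupd, PySem.Set.mem_ofList]
  simp only [pvPairs, pvChars, List.mem_map, List.mem_flatMap, List.mem_flatten, List.mem_map]
  constructor
  · rintro ⟨⟨c', i'⟩, ⟨p, hp, c'', hc'', heq⟩, rfl⟩
    obtain ⟨rfl, rfl⟩ := Prod.mk.injEq .. ▸ heq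
    rw [pv_mem_enumerate] at hp
    obtain ⟨j, hj, rfl⟩ := hp
    exact ⟨(sides[j]).toList, ⟨sides[j], by simp, rfl⟩, hc''⟩
  · rintro ⟨l, ⟨s, hs, rfl⟩, hc⟩
    obtain ⟨j, hj, rfl⟩ := List.mem_iff_getElem.mp hs
    exact ⟨(c, (j:Int)), ⟨((j:Int), sides[j]), (pv_mem_enumerate ..).mpr ⟨j, hj, by simp⟩, c, hc, rfl⟩, rfl⟩

lemma pv_badPair_eq (sides : List String) (c1 c2 : Char) :
    pvBadPairA sides c1 c2 = ((pvSideIdx sides).getD c1 []).any (fun i => ((pvSideIdx sides).getD c2 []).contains i) := by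
  rw [Bool.eq_iff_iff]
  simp only [pvBadPairA, List.any_eq_true, Bool.and_eq_true, List.contains_eq_mem, decide_eq_true_eq]
  constructor
  · rintro ⟨s, hs, h1, h2⟩
    obtain ⟨j, hj, rfl⟩ := List.mem_iff_getElem.mp hs
    refine ⟨(j:Int), ?_, ?_⟩
    · exact (pv_getD_sideIdx ..).mpr ⟨((j:Int), sides[j]), (pv_mem_enumerate ..).mpr ⟨j, hj, by simp⟩, h1, rfl⟩
    · exact (pv_getD_sideIdx ..).mpr ⟨((j:Int), sides[j]), (pv_mem_enumerate ..).mpr ⟨j, hj, by simp⟩, h2, rfl⟩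
  · rintro ⟨i, h1, h2⟩
    rw [pv_getD_sideIdx] at h1 h2
    obtain ⟨p, hp, hcp, rfl⟩ := h1
    obtain ⟨q, hq, hcq, hiq⟩ := h2
    rw [pv_mem_enumerate] at hp hq
    obtain ⟨j, hj, rfl⟩ := hp
    obtain ⟨j', hj', rfl⟩ := hq
    simp only [zero_add] at hiq
    have : j = j' := by exact_mod_cast hiq
    subst this
    exact ⟨sides[j], by simp, hcp, by simpa using hcq⟩

lemma pv_seq_some (idx : PySem.Dict Char (List Int)) (cs : List Char)
    (h : cs.all (fun c => idx.contains c) = true) :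
    pvSeqB idx cs = some (cs.map (fun c => idx.getD c [])) := by
  induction cs with
  | nil => rfl
  | cons c rest ih =>
    simp only [List.all_cons, Bool.and_eq_true] at h
    simp [pvSeqB, h.1, ih h.2]

lemma pv_seq_none (idx : PySem.Dict Char (List Int)) (cs : List Char)
    (h : ¬ cs.all (fun c => idx.contains c) = true) :
    pvSeqB idx cs = none := by
  induction cs with
  | nil => simp at h
  | cons c rest ih =>
    simp only [List.all_cons, Bool.and_eq_true] at h
    by_cases hc : idx.contains c = true
    · have : ¬ rest.all (fun c => idx.contains c) = true := fun hr => h ⟨hc, hr⟩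
      simp [pvSeqB, hc, ih this]
    · simp [pvSeqB, hc]

lemma pv_adjScan_eq (sides : List String) (g : Char → List Int)
    (hpair : ∀ c1 c2, pvBadPairA sides c1 c2 = (g c1).any (fun i => (g c2).contains i))
    (cs : List Char) :
    pvAdjScanA sides cs = !(pvAdjOkB (cs.map g)) := by
  induction cs with
  | nil => rfl
  | cons c rest ih =>
    cases rest with
    | nil => rfl
    | cons c2 r2 =>
      simp only [pvAdjScanA, List.map, pvAdjOkB, ih, hpair]
      cases h : ((g c).any fun i => (g c2).contains i) <;> simp

lemma pv_valid_eq (sides : List String) (w : String) :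
    is_valid_word w sides = pvValidB (pvSideIdx sides) w := by
  unfold is_valid_word pvValidB
  by_cases hlen : PySem.Str.len w < 3
  · rw [if_pos hlen, if_pos hlen]
  · rw [if_neg hlen, if_neg hlen]
    have hcontains : ∀ c, ((PySem.Str.join "" sides).toList).contains c = (pvSideIdx sides).contains c := by
      intro c; rw [pv_joined_eq, pv_contains_sideIdx]
    simp only [hcontains]
    by_cases hall : w.toList.all (fun c => (pvSideIdx sides).contains c) = true
    · rw [pv_seq_some _ _ hall,
        pv_adjScan_eq sides (fun c => (pvSideIdx sides).getD c []) (pv_badPair_eq sides)]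
      simp only [hall, Bool.not_true, if_false]
      cases h : pvAdjOkB (w.toList.map fun c => (pvSideIdx sides).getD c []) <;> simp [h]
    · rw [pv_seq_none _ _ hall]
      simp [Bool.not_eq_true] at hall
      simp [hall]

-- the per-letter filter both groupings compute
def pvF (V : List String) (c : Char) : List String :=
  V.filter (fun w => PySem.Str.pyGet? w 0 == some c)

lemma pv_ofList_key_inj (c c' : Char) (h : String.ofList [c] = String.ofList [c']) : c = c' := by
  have := congrArg String.toList h; simpa using this

lemma pv_contains_of_items {d : PySem.Dict String (List String)} {K : List Char} {g : Char → List String}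
    (hd : d.items = K.map (fun c => (String.ofList [c], g c))) (c : Char) :
    d.contains (String.ofList [c]) = decide (c ∈ K) := by
  rw [Bool.eq_iff_iff, PySem.Dict.contains_iff_mem_keys]
  simp only [PySem.Dict.keys, hd, List.map_map, List.mem_map, Function.comp, decide_eq_true_eq]
  constructor
  · rintro ⟨c', hc', heq⟩; exact (pv_ofList_key_inj _ _ heq) ▸ hc'
  · intro hc; exact ⟨c, hc, rfl⟩

lemma pv_items_insert_fold (L : List Char) (val : Char → List String) :
    ((L.foldl (fun d c => d.insert (String.ofList [c]) (val c)) PySem.Dict.empty)).items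
      = (PySem.Set.ofList L).map (fun c => (String.ofList [c], val c)) := by
  induction L using List.reverseRecOn with
  | nil => rfl
  | append_singleton L c ih =>
    rw [List.foldl_append, List.foldl_cons, List.foldl_nil]
    have hofl : PySem.Set.ofList (L ++ [c]) = PySem.Set.add (PySem.Set.ofList L) c := by
      rw [PySem.Set.ofList_append]; rfl
    by_cases hc : c ∈ PySem.Set.ofList L
    · rw [PySem.Dict.items_insert_of_contains _ _ (by rw [pv_contains_of_items ih]; simpa using hc)]
      have hadd : PySem.Set.add (PySem.Set.ofList L) c = PySem.Set.ofList L := by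
        simp [PySem.Set.add, hc]
      rw [ih, List.map_map, hofl, hadd]
      apply List.map_congr_left
      intro c' hc'
      simp only [Function.comp]
      by_cases he : (String.ofList [c'] == String.ofList [c]) = true
      · have : c' = c := pv_ofList_key_inj _ _ (beq_iff_eq.mp he)
        subst this; simp
      · simp [he]
    · rw [PySem.Dict.items_insert_of_not_contains _ _ (by rw [pv_contains_of_items ih]; simpa using hc)]
      have hadd : PySem.Set.add (PySem.Set.ofList L) c = PySem.Set.ofList L ++ [c] := by
        simp [PySem.Set.add, hc]
      rw [ih, hofl, hadd, List.map_append]; rfl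

lemma pv_items_setdefault_fold (L : List Char) :
    ((L.foldl (fun d c => d.setdefault (String.ofList [c]) []) PySem.Dict.empty)).items
      = (PySem.Set.ofList L).map (fun c => (String.ofList [c], ([] : List String))) := by
  induction L using List.reverseRecOn with
  | nil => rfl
  | append_singleton L c ih =>
    rw [List.foldl_append, List.foldl_cons, List.foldl_nil]
    have hofl : PySem.Set.ofList (L ++ [c]) = PySem.Set.add (PySem.Set.ofList L) c := by
      rw [PySem.Set.ofList_append]; rfl
    by_cases hc : c ∈ PySem.Set.ofList L
    · rw [PySem.Dict.setdefault_of_contains _ _ (by rw [pv_contains_of_items ih]; simpa using hc)]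
      have hadd : PySem.Set.add (PySem.Set.ofList L) c = PySem.Set.ofList L := by
        simp [PySem.Set.add, hc]
      rw [ih, hofl, hadd]
    · rw [PySem.Dict.setdefault_of_not_contains _ _ (by rw [pv_contains_of_items ih]; simpa using hc),
        PySem.Dict.items_insert_of_not_contains _ _ (by rw [pv_contains_of_items ih]; simpa using hc)]
      have hadd : PySem.Set.add (PySem.Set.ofList L) c = PySem.Set.ofList L ++ [c] := by
        simp [PySem.Set.add, hc]
      rw [ih, hofl, hadd, List.map_append]; rfl

lemma pv_initGroups_eq (sides : List String) :
    pvInitGroups sides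
      = (pvChars sides).foldl (fun d c => d.setdefault (String.ofList [c]) []) PySem.Dict.empty := by
  simp [pvInitGroups, pvChars, List.foldl_flatten, List.foldl_map]

lemma pv_fill_eq (V : List String) (K : List Char) (g : Char → List String) (hK : K.Nodup) :
    pvFillGroups (PySem.Dict.mk (K.map (fun c => (String.ofList [c], g c)))) V
      = PySem.Dict.mk (K.map (fun c => (String.ofList [c], g c ++ pvF V c))) := by
  induction V generalizing g with
  | nil => simp [pvFillGroups, pvF]
  | cons w rest ih =>
    have hstep : pvFillGroups (PySem.Dict.mk (K.map (fun c => (String.ofList [c], g c)))) (w :: rest)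
        = pvFillGroups ((fun d w => match PySem.Str.pyGet? w 0 with
            | some c => if d.contains (String.ofList [c]) then d.modify (String.ofList [c]) [] (· ++ [w]) else d
            | none => d) (PySem.Dict.mk (K.map (fun c => (String.ofList [c], g c)))) w) rest := rfl
    cases hw : PySem.Str.pyGet? w 0 with
    | none =>
      rw [hstep]; simp only [hw]
      rw [ih g]
      congr 1
      apply List.map_congr_left; intro c _
      have hpred : ((PySem.Str.pyGet? w 0 == some c) : Bool) = false := by rw [hw]; rfl
      have hpv : pvF (w :: rest) c = pvF rest c := by
        simp only [pvF, List.filter_cons, hpred, Bool.false_eq_true, if_false]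
      rw [hpv]
    | some c0 =>
      rw [hstep]; simp only [hw]
      have hcont : (PySem.Dict.mk (K.map (fun c => (String.ofList [c], g c)))).contains (String.ofList [c0])
          = decide (c0 ∈ K) := pv_contains_of_items rfl c0
      by_cases hc0 : c0 ∈ K
      · rw [hcont]
        simp only [hc0, decide_true, if_true]
        have hkeysnd : (PySem.Dict.mk (K.map (fun c => (String.ofList [c], g c)))).keys.Nodup := by
          simp only [PySem.Dict.keys, List.map_map]
          exact hK.map (fun c c' h => pv_ofList_key_inj c c' (by simpa using h))
        have hmem : ((String.ofList [c0], g c0) : String × List String)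
            ∈ (PySem.Dict.mk (K.map (fun c => (String.ofList [c], g c)))).items :=
          List.mem_map.mpr ⟨c0, hc0, rfl⟩
        have hgetD : (PySem.Dict.mk (K.map (fun c => (String.ofList [c], g c)))).getD (String.ofList [c0]) [] = g c0 :=
          PySem.Dict.getD_of_mem_items _ hmem hkeysnd []
        have hmod : (PySem.Dict.mk (K.map (fun c => (String.ofList [c], g c)))).modify (String.ofList [c0]) [] (· ++ [w])
            = PySem.Dict.mk (K.map (fun c => (String.ofList [c], if c = c0 then g c ++ [w] else g c))) := by
          apply PySem.Dict.ext
          have hmi : (PySem.Dict.mk (K.map (fun c => (String.ofList [c], g c)))).modify (String.ofList [c0]) [] (· ++ [w])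
              = (PySem.Dict.mk (K.map (fun c => (String.ofList [c], g c)))).insert (String.ofList [c0]) (g c0 ++ [w]) := by
            rw [← hgetD]; rfl
          rw [hmi, PySem.Dict.items_insert_of_contains _ _ (by rw [hcont]; simpa using hc0)]
          show List.map _ (K.map (fun c => (String.ofList [c], g c))) = _
          rw [List.map_map]
          apply List.map_congr_left
          intro c' _
          simp only [Function.comp]
          by_cases he : c' = c0
          · subst he; simp
          · have hbe : (String.ofList [c'] == String.ofList [c0]) = false := by
              apply beq_eq_false_iff_ne.mpr
              intro hh; exact he (pv_ofList_key_inj _ _ hh)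
            simp [hbe, he]
        rw [hmod, ih (fun c => if c = c0 then g c ++ [w] else g c)]
        congr 1
        apply List.map_congr_left
        intro c hc
        by_cases he : c = c0
        · subst he
          have hpred : ((PySem.Str.pyGet? w 0 == some c) : Bool) = true := by rw [hw]; simp
          have hpv : pvF (w :: rest) c = w :: pvF rest c := by
            simp only [pvF, List.filter_cons, hpred, if_true]
          simp [hpv]
        · have hpred : ((PySem.Str.pyGet? w 0 == some c) : Bool) = false := by
            rw [hw]
            simp only [beq_eq_false_iff_ne, ne_eq, Option.some.injEq]
            exact fun hh => he hh.symm
          have hpv : pvF (w :: rest) c = pvF rest c := by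
            simp only [pvF, List.filter_cons, hpred, Bool.false_eq_true, if_false]
          simp [hpv, he]
      · rw [hcont]
        simp only [hc0, decide_false, Bool.false_eq_true, if_false]
        rw [ih g]
        congr 1
        apply List.map_congr_left
        intro c hc
        have hne : c0 ≠ c := fun hh => hc0 (hh ▸ hc)
        have hpred : ((PySem.Str.pyGet? w 0 == some c) : Bool) = false := by
          rw [hw]
          simp only [beq_eq_false_iff_ne, ne_eq, Option.some.injEq]
          exact hne
        have hpv : pvF (w :: rest) c = pvF rest c := by
          simp only [pvF, List.filter_cons, hpred, Bool.false_eq_true, if_false]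
        rw [hpv]

lemma pv_groups_eq (sides : List String) (V : List String) :
    (group_words_by_start sides V).items = (pvFillGroups (pvInitGroups sides) V).items := by
  have hinit : pvInitGroups sides
      = PySem.Dict.mk ((PySem.Set.ofList (pvChars sides)).map (fun c => (String.ofList [c], ([] : List String)))) := by
    apply PySem.Dict.ext
    rw [pv_initGroups_eq, pv_items_setdefault_fold]
  rw [hinit, pv_fill_eq V _ _ (PySem.Set.nodup_ofList _)]
  unfold group_words_by_start
  rw [pv_joined_eq, pv_items_insert_fold (pvChars sides) (fun c => V.filter (fun w => PySem.Str.pyGet? w 0 == some c))]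
  simp [pvF]

-- ===== VERDICT (by name: the statement is the Claim_ definition above) =====
theorem prepare_valid_words_spec : Claim_equal_prepare_valid_words := by
  intro word_list sides skip_validation _ _
  unfold Spec_prepare_valid_words prepare_valid_words prepare_valid_words_alt
  cases skip_validation with
  | true =>
    simp only [Bool.not_true, Bool.false_eq_true, if_false, if_true, Prod.mk.injEq]
    exact ⟨trivial, pv_groups_eq _ _⟩
  | false =>
    have hf : word_list.filter (fun w => is_valid_word w sides)
        = word_list.filter (fun w => pvValidB (pvSideIdx sides) w) :=
      List.filter_congr (fun w _ => pv_valid_eq sides w)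
    simp only [Bool.not_false, if_true, Bool.false_eq_true, if_false, hf, Prod.mk.injEq]
    exact ⟨trivial, pv_groups_eq _ _⟩
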